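-- pv_equiv track=rewrite | github.com/alex-yung-github/AI | tetrispt2.py | getLHeight
-- ===== SOURCE A (Python) =====
-- types = {"I0": " " * 12 + "####", "I1": "#" + "   " + "#" + "   " + "#" + "   " + "#" + "   ",
--          "O0": " " * 8 + "##" + "  " + "##" + "  ",
--          "T0": " " * 8 + " #  " + "### ", "T1": " " * 4 + "#   " + "##  " + "#   ", "T2": " " * 8 + "### " + " #  ", "T3": " " * 4 + " #  " + "##  " + " #  ",
--          "S0": " " * 8 + " ## " + "##  ", "S1": " " * 4 + "#   " + "##  " + " #  ",
--          "Z0": " " * 8 + "##  " + " ## ", "Z1": " " * 4 + " #  " + "##  " + "#   ",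
--          "J0": " " * 8 + "#   " + "### ", "J1": " " * 4 + "##  " + "#   " + "#   ", "J2": " " * 8 + "### " + "  # ", "J3": " " * 4 + " #  " + " #  " + "##  ",
--          "L0": " " * 8 + "  # " + "### ", "L1": " " * 4 + "#   " + "#   " + "##  ", "L2": " " * 8 + "### " + "#   ", "L3": " " * 4 + "##  " + " #  " + " #  "}
--
-- def getLHeight(piece):
--     block = types[piece]
--     count = 0
--     start = 0
--     startreached = False
--     for h in reversed(range(4)):
--         index = (h*4)
--         if(block[index:index+1] == "#"):
--             count+=1
--             if(startreached == False):
--                 start = 4-h-1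
--                 startreached = True
--     return [count, start]
-- ===== SOURCE B (Python) =====
-- types = {"I0": " " * 12 + "####", "I1": "#" + "   " + "#" + "   " + "#" + "   " + "#" + "   ",
--          "O0": " " * 8 + "##" + "  " + "##" + "  ",
--          "T0": " " * 8 + " #  " + "### ", "T1": " " * 4 + "#   " + "##  " + "#   ", "T2": " " * 8 + "### " + " #  ", "T3": " " * 4 + " #  " + "##  " + " #  ",
--          "S0": " " * 8 + " ## " + "##  ", "S1": " " * 4 + "#   " + "##  " + " #  ",
--          "Z0": " " * 8 + "##  " + " ## ", "Z1": " " * 4 + " #  " + "##  " + "#   ",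
--          "J0": " " * 8 + "#   " + "### ", "J1": " " * 4 + "##  " + "#   " + "#   ", "J2": " " * 8 + "### " + "  # ", "J3": " " * 4 + " #  " + " #  " + "##  ",
--          "L0": " " * 8 + "  # " + "### ", "L1": " " * 4 + "#   " + "#   " + "##  ", "L2": " " * 8 + "### " + "#   ", "L3": " " * 4 + "##  " + " #  " + " #  "}
--
-- def getLHeight(piece):
--     col = types[piece][0::4]          # leftmost column, top to bottom
--     count = col.count("#")
--     start = col[::-1].find("#")       # first filled cell from the bottom; -1 if none
--     return [count, max(start, 0)]
-- ===== Notes on version B (the rewrite author's own statement) =====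
-- stated objective: simpler
-- what changed: Replaces the reversed loop carrying (count, start, startreached) state with a stride slice extracting the leftmost column followed by two independent library scans: counting the filled cells, and a reversed find (clamped at 0) for the bottom-most filled cell.
import Mathlib
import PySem

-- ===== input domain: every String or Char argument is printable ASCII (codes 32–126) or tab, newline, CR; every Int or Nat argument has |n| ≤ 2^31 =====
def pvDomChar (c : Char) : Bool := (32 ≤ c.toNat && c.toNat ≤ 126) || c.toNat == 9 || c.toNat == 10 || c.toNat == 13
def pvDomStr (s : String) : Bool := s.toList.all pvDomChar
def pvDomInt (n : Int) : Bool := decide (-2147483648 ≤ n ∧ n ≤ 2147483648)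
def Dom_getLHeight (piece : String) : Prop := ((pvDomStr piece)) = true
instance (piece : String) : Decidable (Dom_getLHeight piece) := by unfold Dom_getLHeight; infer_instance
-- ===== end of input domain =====

-- ===== PORT A =====
-- B is a simpler decomposition: extract the leftmost column with a stride slice,
-- then count the filled cells in one scan and find the bottom-most one with a reversed find.
-- Pre_ excludes piece names not in the `types` dict, where Python A raises KeyError.

-- the module-level `types` dict
def typesDict : PySem.Dict String String :=
  PySem.Dict.ofList
    [("I0", "            ####"), ("I1", "#   #   #   #   "),
     ("O0", "        ##  ##  "),
     ("T0", "         #  ### "), ("T1", "    #   ##  #   "), ("T2", "        ###  #  "), ("T3", "     #  ##   #  "),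
     ("S0", "         ## ##  "), ("S1", "    #   ##   #  "),
     ("Z0", "        ##   ## "), ("Z1", "     #  ##  #   "),
     ("J0", "        #   ### "), ("J1", "    ##  #   #   "), ("J2", "        ###   # "), ("J3", "     #   #  ##  "),
     ("L0", "          # ### "), ("L1", "    #   #   ##  "), ("L2", "        ### #   "), ("L3", "    ##   #   #  ")]

def getLHeight (piece : String) : List Int :=
  let block := (typesDict.get? piece).getD ""   -- KeyError (none) excluded by Pre_
  let st := ((PySem.List.pyRange 0 4 1).reverse).foldl
    (fun (s : Int × Int × Bool) h =>
      let (count, start, startreached) := s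
      let index := h * 4
      if PySem.Str.slice block (some index) (some (index + 1)) = "#" then
        if startreached = false then (count + 1, 4 - h - 1, true)
        else (count + 1, start, startreached)
      else s)
    (0, 0, false)
  [st.1, st.2.1]

-- ===== PORT B =====
def getLHeight_alt (piece : String) : List Int :=
  let block := (typesDict.get? piece).getD ""   -- KeyError (none) excluded by Pre_
  let col := (PySem.Str.slice? block none none 4).getD ""       -- block[0::4]
  let count : Int := PySem.Str.count col "#"
  let start := PySem.Str.find ((PySem.Str.slice? col none none (-1)).getD "") "#"
  [count, max start 0]

-- ===== PRECONDITION & SPEC =====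
-- Pre_: piece is one of the 20 piece names; on any other string A raises KeyError.
def Pre_getLHeight (piece : String) : Prop :=
  piece ∈ ["I0", "I1", "O0", "T0", "T1", "T2", "T3", "S0", "S1", "Z0", "Z1",
           "J0", "J1", "J2", "J3", "L0", "L1", "L2", "L3"]
instance (piece : String) : Decidable (Pre_getLHeight piece) := by
  unfold Pre_getLHeight; infer_instance
def pvWitness_getLHeight : String := ("T0")

def Spec_getLHeight (piece : String) (out : List Int) : Prop := out = getLHeight_alt piece
instance (piece : String) (out : List Int) : Decidable (Spec_getLHeight piece out) := by
  unfold Spec_getLHeight; infer_instance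

-- ===== CLAIM (what is proved, stated in full; the proofs are below) =====
def Claim_equal_getLHeight : Prop :=
  ∀ (piece : String), Dom_getLHeight piece → Pre_getLHeight piece →
    Spec_getLHeight piece (getLHeight piece)

-- ===== LEMMAS AND PROOFS =====

-- ===== VERDICT (by name: the statement is the Claim_ definition above) =====
theorem getLHeight_spec : Claim_equal_getLHeight := by
  intro piece _ hpre
  unfold Pre_getLHeight at hpre
  unfold Spec_getLHeight
  fin_cases hpre <;> decide
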